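-- pv_equiv track=rewrite | github.com/Bapannarama/3rd-year-project | shep.py | numerator
-- ===== SOURCE A (Python) =====
-- def numerator(w):
-- 	x = 0
-- 	y = 0
--
-- 	for i in range(len(w)):
-- 		for j in range(len(w[0])):
-- 			x += i * w[i][j]
-- 			y += j * w[i][j]
--
-- 	return [x,y]
-- ===== SOURCE B (Python) =====
-- def numerator(w):
-- 	if not w:
-- 		return [0, 0]
-- 	m = len(w[0])
-- 	rowsums = [sum(row[j] for j in range(m)) for row in w]
-- 	colsums = [sum(row[j] for row in w) for j in range(m)]
-- 	x = sum(i * s for i, s in enumerate(rowsums))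
-- 	y = sum(j * s for j, s in enumerate(colsums))
-- 	return [x, y]
-- ===== Notes on version B (the rewrite author's own statement) =====
-- stated objective: alternative
-- what changed: B first reduces the matrix to its row and column marginal sums, then computes the two index-weighted totals in separate single passes, instead of A's fused double loop accumulating both totals per cell.
import Mathlib
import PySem

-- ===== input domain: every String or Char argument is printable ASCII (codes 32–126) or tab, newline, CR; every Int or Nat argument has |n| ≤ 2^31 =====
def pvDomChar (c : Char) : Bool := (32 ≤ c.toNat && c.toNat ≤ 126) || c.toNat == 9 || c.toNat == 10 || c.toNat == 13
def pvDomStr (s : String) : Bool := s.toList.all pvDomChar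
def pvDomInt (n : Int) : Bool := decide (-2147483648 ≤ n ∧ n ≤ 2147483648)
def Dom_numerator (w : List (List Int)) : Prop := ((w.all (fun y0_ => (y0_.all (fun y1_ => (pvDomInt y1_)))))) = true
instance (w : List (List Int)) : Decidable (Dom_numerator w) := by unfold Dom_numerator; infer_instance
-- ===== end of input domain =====

-- B reshapes the computation: row/column marginal sums first, then two index-weighted passes.
-- ===== PORT A =====
def numerator (w : List (List Int)) : List Int :=
  let p := (List.range w.length).foldl (fun (p : Int × Int) (i : Nat) =>
    (List.range (w.getD 0 []).length).foldl (fun (q : Int × Int) (j : Nat) =>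
      (q.1 + (i : Int) * ((w.getD i []).getD j 0),
       q.2 + (j : Int) * ((w.getD i []).getD j 0))) p) (0, 0)
  [p.1, p.2]

-- ===== PORT B =====
def numerator_alt (w : List (List Int)) : List Int :=
  match w with
  | [] => [0, 0]
  | r0 :: _ =>
    let m := r0.length
    let rowsums := w.map (fun row => ((List.range m).map (fun j => row.getD j 0)).sum)
    let colsums := (List.range m).map (fun j => (w.map (fun row => row.getD j 0)).sum)
    let x := ((rowsums.zipIdx).map (fun p => (p.2 : Int) * p.1)).sum
    let y := ((colsums.zipIdx).map (fun p => (p.2 : Int) * p.1)).sum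
    [x, y]

-- ===== PRECONDITION & SPEC =====
-- Pre_ excludes ragged inputs where some row is shorter than the first row: there Python A raises IndexError.
def Pre_numerator (w : List (List Int)) : Prop := ∀ r ∈ w, (w.getD 0 []).length ≤ r.length
instance (w : List (List Int)) : Decidable (Pre_numerator w) := by unfold Pre_numerator; infer_instance
def pvWitness_numerator : List (List Int) := [[1, 2], [3, 4]]
def Spec_numerator (w : List (List Int)) (out : List Int) : Prop := out = numerator_alt w
instance (w : List (List Int)) (out : List Int) : Decidable (Spec_numerator w out) := by unfold Spec_numerator; infer_instance

-- ===== CLAIM (what is proved, stated in full; the proofs are below) =====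
def Claim_equal_numerator : Prop := ∀ (w : List (List Int)), Dom_numerator w → Pre_numerator w → Spec_numerator w (numerator w)

-- ===== LEMMAS AND PROOFS =====

lemma pv_foldl_pair {α : Type} (F G : α → Int) (l : List α) (init : Int × Int) :
    l.foldl (fun p a => (p.1 + F a, p.2 + G a)) init = (init.1 + (l.map F).sum, init.2 + (l.map G).sum) := by
  induction l generalizing init with
  | nil => simp
  | cons a t ih =>
    simp only [List.foldl_cons, List.map_cons, List.sum_cons, ih]
    rw [add_assoc, add_assoc]

lemma pv_sum_map_range (f : Nat → Int) (n : Nat) :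
    ((List.range n).map f).sum = ∑ i ∈ Finset.range n, f i := by
  induction n with
  | zero => simp
  | succ n ih => simp [List.range_succ, Finset.sum_range_succ, ih]

lemma pv_sum_map_list {α : Type} (f : α → Int) (d : α) (l : List α) :
    (l.map f).sum = ∑ i ∈ Finset.range l.length, f (l.getD i d) := by
  induction l with
  | nil => simp
  | cons a t ih =>
    simp only [List.map_cons, List.sum_cons, List.length_cons, Finset.sum_range_succ', ih]
    simp only [List.getD]
    exact add_comm _ _

lemma pv_zipIdx_sum (l : List Int) (k : Nat) :
    ((l.zipIdx k).map (fun p => (p.2 : Int) * p.1)).sum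
      = ∑ i ∈ Finset.range l.length, ((k + i : Nat) : Int) * l.getD i 0 := by
  induction l generalizing k with
  | nil => simp
  | cons a t ih =>
    rw [List.zipIdx_cons, List.map_cons, List.sum_cons, ih, List.length_cons,
      Finset.sum_range_succ']
    simp only [List.getD_cons_succ, List.getD_cons_zero, Nat.add_zero]
    push_cast
    rw [add_comm]
    congr 1
    apply Finset.sum_congr rfl
    intro i _
    push_cast
    ring

lemma pv_getD_map {α β : Type} (f : α → β) (l : List α) (i : Nat) (d : α) (db : β)
    (h : i < l.length) : (l.map f).getD i db = f (l.getD i d) := by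
  rw [List.getD_eq_getElem _ _ (by simpa using h), List.getD_eq_getElem _ _ h]
  simp

-- ===== VERDICT (by name: the statement is the Claim_ definition above) =====
theorem numerator_spec : Claim_equal_numerator := by
  intro w _ _
  unfold Spec_numerator numerator numerator_alt
  match w with
  | [] => simp
  | r0 :: t =>
    simp only []
    set w := r0 :: t with hw
    set m := r0.length with hm
    set g : Nat → Nat → Int := fun i j => (w.getD i []).getD j 0 with hg
    have hinner : ∀ (i : Nat) (p : Int × Int),
        (List.range m).foldl (fun (q : Int × Int) (j : Nat) =>
          (q.1 + (i : Int) * ((w.getD i []).getD j 0),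
           q.2 + (j : Int) * ((w.getD i []).getD j 0))) p
        = (p.1 + ∑ j ∈ Finset.range m, (i : Int) * g i j,
           p.2 + ∑ j ∈ Finset.range m, (j : Int) * g i j) := by
      intro i p
      rw [pv_foldl_pair (fun j => (i : Int) * ((w.getD i []).getD j 0))
            (fun j => (j : Int) * ((w.getD i []).getD j 0))]
      rw [pv_sum_map_range, pv_sum_map_range]
    have hA : (List.range w.length).foldl (fun (p : Int × Int) (i : Nat) =>
        (List.range (w.getD 0 []).length).foldl (fun (q : Int × Int) (j : Nat) =>
          (q.1 + (i : Int) * ((w.getD i []).getD j 0),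
           q.2 + (j : Int) * ((w.getD i []).getD j 0))) p) (0, 0)
        = (∑ i ∈ Finset.range w.length, ∑ j ∈ Finset.range m, (i : Int) * g i j,
           ∑ i ∈ Finset.range w.length, ∑ j ∈ Finset.range m, (j : Int) * g i j) := by
      have hlen : (w.getD 0 []).length = m := by rw [hw]; simp [List.getD, hm]
      rw [hlen]
      have : (fun (p : Int × Int) (i : Nat) =>
          (List.range m).foldl (fun (q : Int × Int) (j : Nat) =>
            (q.1 + (i : Int) * ((w.getD i []).getD j 0),
             q.2 + (j : Int) * ((w.getD i []).getD j 0))) p)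
          = fun (p : Int × Int) (i : Nat) =>
            (p.1 + ∑ j ∈ Finset.range m, (i : Int) * g i j,
             p.2 + ∑ j ∈ Finset.range m, (j : Int) * g i j) := by
        funext p i; exact hinner i p
      rw [this, pv_foldl_pair (fun (i : Nat) => ∑ j ∈ Finset.range m, (i : Int) * g i j)
            (fun (i : Nat) => ∑ j ∈ Finset.range m, (j : Int) * g i j)]
      rw [pv_sum_map_range, pv_sum_map_range]
      simp
    rw [hA]
    -- B side
    have hrow : ((w.map (fun row => ((List.range m).map (fun j => row.getD j 0)).sum)).zipIdx.map
          (fun p => (p.2 : Int) * p.1)).sum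
        = ∑ i ∈ Finset.range w.length, (i : Int) * ∑ j ∈ Finset.range m, g i j := by
      rw [pv_zipIdx_sum]
      simp only [List.length_map]
      apply Finset.sum_congr rfl
      intro i hi
      rw [Finset.mem_range] at hi
      rw [pv_getD_map _ _ _ [] _ hi, pv_sum_map_range]
      simp [hg]
    have hcol : (((List.range m).map (fun j => (w.map (fun row => row.getD j 0)).sum)).zipIdx.map
          (fun p => (p.2 : Int) * p.1)).sum
        = ∑ j ∈ Finset.range m, (j : Int) * ∑ i ∈ Finset.range w.length, g i j := by
      rw [pv_zipIdx_sum]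
      simp only [List.length_map, List.length_range]
      apply Finset.sum_congr rfl
      intro j hj
      rw [Finset.mem_range] at hj
      rw [pv_getD_map _ _ _ 0 _ (by simpa using hj)]
      rw [List.getD_eq_getElem _ _ (by simpa using hj)]
      simp only [List.getElem_range, Nat.zero_add]
      rw [pv_sum_map_list (fun row => row.getD j 0) []]
    rw [hrow, hcol]
    show [∑ i ∈ Finset.range w.length, ∑ j ∈ Finset.range m, (i : Int) * g i j,
          ∑ i ∈ Finset.range w.length, ∑ j ∈ Finset.range m, (j : Int) * g i j] = _
    congr 1
    · exact Finset.sum_congr rfl (fun i _ => (Finset.mul_sum _ _ _).symm)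
    · congr 1
      exact (Finset.sum_comm (s := Finset.range w.length) (t := Finset.range m)
          (f := fun i j => (j : Int) * g i j)).trans
        (Finset.sum_congr rfl (fun j _ => (Finset.mul_sum _ _ _).symm))
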